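-- pv_equiv track=rewrite | github.com/NYU-Molecular-Pathology/LG-PACT | bin/merge_vcf_callers.py | merge_variants
-- ===== SOURCE A (Python) =====
-- def merge_variants(mutect_vars, lofreqsomatic_vars, strelka_vars):
--     """
--     Merge variants according to priority rules.
--
--     Returns:
--         dict mapping var_key to (fields, source) where source is the caller used
--     """
--     merged = {}
--
--     # Get all unique variant keys
--     all_keys = set(mutect_vars.keys()) | set(lofreqsomatic_vars.keys()) | set(strelka_vars.keys())
--
--     for var_key in all_keys:
--         in_mutect = var_key in mutect_vars
--         in_lofreqsomatic = var_key in lofreqsomatic_vars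
--         in_strelka = var_key in strelka_vars
--
--         # Rule 1: If in all 3, use MuTect
--         if in_mutect and in_lofreqsomatic and in_strelka:
--             merged[var_key] = (mutect_vars[var_key], 'MuTect+LoFreqSomatic+Strelka')
--
--         # Rule 2: If in MuTect + Strelka, use MuTect
--         elif in_mutect and in_strelka and not in_lofreqsomatic:
--             merged[var_key] = (mutect_vars[var_key], 'MuTect+Strelka')
--
--         # Rule 3: If in LoFreqSomatic + Strelka only, use LoFreqSomatic
--         elif in_lofreqsomatic and in_strelka and not in_mutect:
--             merged[var_key] = (lofreqsomatic_vars[var_key], 'LoFreqSomatic+Strelka')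
--
--         # Rule 4: Use whichever caller detected it
--         elif in_mutect:
--             merged[var_key] = (mutect_vars[var_key], 'MuTect')
--         elif in_lofreqsomatic:
--             merged[var_key] = (lofreqsomatic_vars[var_key], 'LoFreqSomatic')
--         elif in_strelka:
--             merged[var_key] = (strelka_vars[var_key], 'Strelka')
--
--     return merged
-- ===== SOURCE B (Python) =====
-- # Layered reimplementation: three staged passes, one per caller in priority
-- # order, composing each label from suffixes instead of a 7-way decision per key.
-- def merge_variants(mutect_vars, lofreqsomatic_vars, strelka_vars):
--     merged = {}
--     # Pass 1: every MuTect variant wins; suffix records corroborating callers.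
--     for key, fields in mutect_vars.items():
--         if key in lofreqsomatic_vars and key in strelka_vars:
--             suffix = '+LoFreqSomatic+Strelka'
--         elif key in strelka_vars:
--             suffix = '+Strelka'
--         else:
--             suffix = ''
--         merged[key] = (fields, 'MuTect' + suffix)
--     # Pass 2: remaining LoFreqSomatic variants.
--     for key, fields in lofreqsomatic_vars.items():
--         if key not in merged:
--             merged[key] = (fields, 'LoFreqSomatic+Strelka' if key in strelka_vars else 'LoFreqSomatic')
--     # Pass 3: variants seen only by Strelka.
--     for key, fields in strelka_vars.items():
--         if key not in merged:
--             merged[key] = (fields, 'Strelka')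
--     return merged
-- ===== Notes on version B (the rewrite author's own statement) =====
-- stated objective: alternative
-- what changed: Replaces the single pass over the union of keys with its per-key 7-case if/elif cascade by three staged passes, one per caller in priority order (MuTect, then LoFreqSomatic, then Strelka), each inserting only keys not yet merged and composing the label from suffixes instead of deciding among seven fixed labels.
import Mathlib
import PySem

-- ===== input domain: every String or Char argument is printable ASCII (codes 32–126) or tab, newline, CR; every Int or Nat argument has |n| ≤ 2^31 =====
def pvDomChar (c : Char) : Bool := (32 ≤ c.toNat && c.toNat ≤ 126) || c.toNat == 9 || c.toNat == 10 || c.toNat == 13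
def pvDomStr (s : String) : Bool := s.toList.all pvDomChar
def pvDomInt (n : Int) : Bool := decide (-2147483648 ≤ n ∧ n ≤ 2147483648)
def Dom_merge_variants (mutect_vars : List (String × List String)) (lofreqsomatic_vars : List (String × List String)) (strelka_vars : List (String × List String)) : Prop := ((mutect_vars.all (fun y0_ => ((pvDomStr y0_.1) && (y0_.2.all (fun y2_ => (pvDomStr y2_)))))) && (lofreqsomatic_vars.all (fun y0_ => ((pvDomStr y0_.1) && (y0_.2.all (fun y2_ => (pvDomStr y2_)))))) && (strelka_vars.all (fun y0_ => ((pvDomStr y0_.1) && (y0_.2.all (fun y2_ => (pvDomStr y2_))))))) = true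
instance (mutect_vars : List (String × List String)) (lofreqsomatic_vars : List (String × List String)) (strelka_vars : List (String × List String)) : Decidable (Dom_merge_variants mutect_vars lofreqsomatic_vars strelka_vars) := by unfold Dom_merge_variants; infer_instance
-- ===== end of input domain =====

-- B replaces A's single pass over the union of keys (with a 7-case if/elif cascade per key) by three
-- staged passes, one per caller in priority order, each inserting only not-yet-merged keys and
-- composing the label from suffixes (objective: alternative decomposition; same cost).

-- ===== PORT A =====
def merge_variants (mutect_vars : List (String × List String)) (lofreqsomatic_vars : List (String × List String)) (strelka_vars : List (String × List String)) : List (String × List String × String) :=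
  -- dict parameters arrive as association lists; Python dict construction = PySem.Dict.ofList
  let md := PySem.Dict.ofList mutect_vars
  let ld := PySem.Dict.ofList lofreqsomatic_vars
  let sd := PySem.Dict.ofList strelka_vars
  -- all_keys = set(mutect_vars.keys()) | set(lofreqsomatic_vars.keys()) | set(strelka_vars.keys())
  let all_keys := PySem.Set.union (PySem.Set.union (PySem.Set.ofList md.keys) (PySem.Set.ofList ld.keys)) (PySem.Set.ofList sd.keys)
  let merged := all_keys.foldl (fun merged var_key =>
    let in_mutect := md.contains var_key
    let in_lofreqsomatic := ld.contains var_key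
    let in_strelka := sd.contains var_key
    if in_mutect && in_lofreqsomatic && in_strelka then
      merged.insert var_key (md.getD var_key [], "MuTect+LoFreqSomatic+Strelka")
    else if in_mutect && in_strelka && !in_lofreqsomatic then
      merged.insert var_key (md.getD var_key [], "MuTect+Strelka")
    else if in_lofreqsomatic && in_strelka && !in_mutect then
      merged.insert var_key (ld.getD var_key [], "LoFreqSomatic+Strelka")
    else if in_mutect then
      merged.insert var_key (md.getD var_key [], "MuTect")
    else if in_lofreqsomatic then
      merged.insert var_key (ld.getD var_key [], "LoFreqSomatic")
    else if in_strelka then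
      merged.insert var_key (sd.getD var_key [], "Strelka")
    else merged) PySem.Dict.empty
  merged.items

-- ===== PORT B =====
def merge_variants_alt (mutect_vars : List (String × List String)) (lofreqsomatic_vars : List (String × List String)) (strelka_vars : List (String × List String)) : List (String × List String × String) :=
  let md := PySem.Dict.ofList mutect_vars
  let ld := PySem.Dict.ofList lofreqsomatic_vars
  let sd := PySem.Dict.ofList strelka_vars
  -- Pass 1: every MuTect variant wins; suffix records corroborating callers
  let merged := md.items.foldl (fun merged kv =>
    let suffix := if ld.contains kv.1 && sd.contains kv.1 then "+LoFreqSomatic+Strelka"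
      else if sd.contains kv.1 then "+Strelka" else ""
    merged.insert kv.1 (kv.2, "MuTect" ++ suffix)) PySem.Dict.empty
  -- Pass 2: remaining LoFreqSomatic variants
  let merged := ld.items.foldl (fun merged kv =>
    if merged.contains kv.1 then merged
    else merged.insert kv.1 (kv.2, if sd.contains kv.1 then "LoFreqSomatic+Strelka" else "LoFreqSomatic")) merged
  -- Pass 3: variants seen only by Strelka
  let merged := sd.items.foldl (fun merged kv =>
    if merged.contains kv.1 then merged
    else merged.insert kv.1 (kv.2, "Strelka")) merged
  merged.items

-- ===== PRECONDITION & SPEC =====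
def Spec_merge_variants (mutect_vars : List (String × List String)) (lofreqsomatic_vars : List (String × List String)) (strelka_vars : List (String × List String)) (out : List (String × List String × String)) : Prop := out = merge_variants_alt mutect_vars lofreqsomatic_vars strelka_vars
instance (mutect_vars : List (String × List String)) (lofreqsomatic_vars : List (String × List String)) (strelka_vars : List (String × List String)) (out : List (String × List String × String)) : Decidable (Spec_merge_variants mutect_vars lofreqsomatic_vars strelka_vars out) := by unfold Spec_merge_variants; infer_instance

-- ===== CLAIM (what is proved, stated in full; the proofs are below) =====
def Claim_equal_merge_variants : Prop := ∀ (mutect_vars : List (String × List String)) (lofreqsomatic_vars : List (String × List String)) (strelka_vars : List (String × List String)), Dom_merge_variants mutect_vars lofreqsomatic_vars strelka_vars → Spec_merge_variants mutect_vars lofreqsomatic_vars strelka_vars (merge_variants mutect_vars lofreqsomatic_vars strelka_vars)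

-- ===== LEMMAS AND PROOFS =====

-- a guarded-insert pass (insert only keys not yet present) appends the fresh items
lemma pv_items_foldl_guarded (ps : List (String × List String))
    (vf : String × List String → List String × String)
    (d : PySem.Dict String (List String × String))
    (hps : (ps.map Prod.fst).Nodup) :
    (ps.foldl (fun d kv => if d.contains kv.1 then d else d.insert kv.1 (vf kv)) d).items
      = d.items ++ (ps.filter (fun kv => !d.contains kv.1)).map (fun kv => (kv.1, vf kv)) := by
  induction ps generalizing d with
  | nil => simp
  | cons p ps ih =>
    simp only [List.map_cons, List.nodup_cons] at hps
    simp only [List.foldl_cons, List.filter_cons]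
    cases h : d.contains p.1 with
    | true =>
      simp only [Bool.not_true, reduceIte, Bool.false_eq_true]
      exact ih d hps.2
    | false =>
      simp only [Bool.not_false, reduceIte, Bool.false_eq_true]
      rw [ih (d.insert p.1 (vf p)) hps.2, PySem.Dict.items_insert_of_not_contains d (vf p) h]
      rw [List.filter_congr (q := fun kv => !d.contains kv.1) ?_]
      · simp
      · intro kv hkv
        have hne : kv.1 ≠ p.1 := fun he => hps.1 (he ▸ List.mem_map_of_mem hkv)
        simp [PySem.Dict.contains_insert, hne]

-- A's per-key result on a key of the union (the unreachable final else collapsed into the Strelka case)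
def pvFA (md ld sd : PySem.Dict String (List String)) (k : String) : List String × String :=
  if md.contains k && ld.contains k && sd.contains k then (md.getD k [], "MuTect+LoFreqSomatic+Strelka")
  else if md.contains k && sd.contains k && !ld.contains k then (md.getD k [], "MuTect+Strelka")
  else if ld.contains k && sd.contains k && !md.contains k then (ld.getD k [], "LoFreqSomatic+Strelka")
  else if md.contains k then (md.getD k [], "MuTect")
  else if ld.contains k then (ld.getD k [], "LoFreqSomatic")
  else if sd.contains k then (sd.getD k [], "Strelka")
  else (sd.getD k [], "Strelka")

-- A's fold over a nodup key list covered by the three callers is the map of pvFA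
lemma pvA_items (md ld sd : PySem.Dict String (List String)) (K : List String) (hK : K.Nodup)
    (hmem : ∀ k ∈ K, (md.contains k || ld.contains k || sd.contains k) = true) :
    (K.foldl (fun merged var_key =>
      if md.contains var_key && ld.contains var_key && sd.contains var_key then
        merged.insert var_key (md.getD var_key [], "MuTect+LoFreqSomatic+Strelka")
      else if md.contains var_key && sd.contains var_key && !ld.contains var_key then
        merged.insert var_key (md.getD var_key [], "MuTect+Strelka")
      else if ld.contains var_key && sd.contains var_key && !md.contains var_key then
        merged.insert var_key (ld.getD var_key [], "LoFreqSomatic+Strelka")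
      else if md.contains var_key then
        merged.insert var_key (md.getD var_key [], "MuTect")
      else if ld.contains var_key then
        merged.insert var_key (ld.getD var_key [], "LoFreqSomatic")
      else if sd.contains var_key then
        merged.insert var_key (sd.getD var_key [], "Strelka")
      else merged) PySem.Dict.empty).items
    = K.map (fun k => (k, pvFA md ld sd k)) := by
  rw [PySem.List.foldl_congr_mem' K _ (fun d k => d.insert k (pvFA md ld sd k)) _ ?_]
  · rw [PySem.Dict.items_foldl_insert_fresh K (fun x => x) (pvFA md ld sd) PySem.Dict.empty
      (fun a _ => PySem.Dict.contains_empty a) (by simpa using hK)]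
    simp [PySem.Dict.empty]
  · intro x hx acc
    have h3 := hmem x hx
    cases hm : md.contains x <;> cases hl : ld.contains x <;> cases hs : sd.contains x <;>
      (try simp [hm, hl, hs] at h3) <;> simp [pvFA, hm, hl, hs]

-- keys from a computed items list
lemma pv_keys_of_items {d : PySem.Dict String (List String × String)}
    {xs : List (String × List String × String)} (h : d.items = xs) :
    d.keys = xs.map Prod.fst := by rw [← h]; rfl

-- B's three staged passes produce the three key segments, canonically
lemma pvB_decomp (md ld sd : PySem.Dict String (List String))
    (hnm : md.keys.Nodup) (hnl : ld.keys.Nodup) (hns : sd.keys.Nodup)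
    (lab1 lab2 : String → String) :
    (sd.items.foldl (fun merged kv =>
        if merged.contains kv.1 then merged else merged.insert kv.1 (kv.2, "Strelka"))
      (ld.items.foldl (fun merged kv =>
        if merged.contains kv.1 then merged else merged.insert kv.1 (kv.2, lab2 kv.1))
        (md.items.foldl (fun merged kv =>
          merged.insert kv.1 (kv.2, lab1 kv.1)) PySem.Dict.empty))).items
    = md.keys.map (fun k => (k, (md.getD k [], lab1 k)))
      ++ (ld.keys.filter (fun k => !(decide (k ∈ md.keys)))).map (fun k => (k, (ld.getD k [], lab2 k)))
      ++ (sd.keys.filter (fun k => !(decide (k ∈ md.keys ++ ld.keys.filter (fun k => !(decide (k ∈ md.keys))))))).map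
          (fun k => (k, (sd.getD k [], "Strelka"))) := by
  have hc1 : ∀ k : String,
      (md.items.foldl (fun merged kv => merged.insert kv.1 (kv.2, lab1 kv.1)) PySem.Dict.empty).contains k
        = decide (k ∈ md.keys) := by
    intro k
    rw [PySem.Dict.contains_eq_decide_mem_keys,
      PySem.Dict.keys_foldl_insert_key md.items Prod.fst (fun _ kv => (kv.2, lab1 kv.1)) PySem.Dict.empty]
    simp [PySem.Dict.empty, PySem.Dict.keys]
  have h1 : (md.items.foldl (fun merged kv => merged.insert kv.1 (kv.2, lab1 kv.1)) PySem.Dict.empty).items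
      = md.keys.map (fun k => (k, (md.getD k [], lab1 k))) := by
    rw [PySem.Dict.items_foldl_insert_fresh md.items Prod.fst (fun kv => (kv.2, lab1 kv.1)) PySem.Dict.empty
      (fun a _ => PySem.Dict.contains_empty a.1) hnm]
    rw [PySem.Dict.items_eq_map_keys md hnm []]
    simp [PySem.Dict.empty, List.map_map, Function.comp]
  have h2 : (ld.items.foldl (fun merged kv =>
        if merged.contains kv.1 then merged else merged.insert kv.1 (kv.2, lab2 kv.1))
        (md.items.foldl (fun merged kv => merged.insert kv.1 (kv.2, lab1 kv.1)) PySem.Dict.empty)).items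
      = md.keys.map (fun k => (k, (md.getD k [], lab1 k)))
        ++ (ld.keys.filter (fun k => !(decide (k ∈ md.keys)))).map (fun k => (k, (ld.getD k [], lab2 k))) := by
    rw [pv_items_foldl_guarded ld.items (fun kv => (kv.2, lab2 kv.1)) _ hnl, h1,
      PySem.Dict.items_eq_map_keys ld hnl [], List.filter_map, List.map_map]
    simp only [Function.comp_def, hc1]
  have hc2 : ∀ k : String,
      (ld.items.foldl (fun merged kv =>
          if merged.contains kv.1 then merged else merged.insert kv.1 (kv.2, lab2 kv.1))
          (md.items.foldl (fun merged kv => merged.insert kv.1 (kv.2, lab1 kv.1)) PySem.Dict.empty)).contains k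
        = decide (k ∈ md.keys ++ ld.keys.filter (fun k => !(decide (k ∈ md.keys)))) := by
    intro k
    have hk := pv_keys_of_items h2
    simp only [List.map_append, List.map_map, Function.comp_def, List.map_id'] at hk
    rw [PySem.Dict.contains_eq_decide_mem_keys, hk]
  rw [pv_items_foldl_guarded sd.items (fun kv => (kv.2, "Strelka")) _ hns, h2]
  rw [List.append_assoc, List.append_assoc]
  congr 2
  rw [PySem.Dict.items_eq_map_keys sd hns [], List.filter_map, List.map_map]
  simp only [Function.comp_def, hc2]

theorem merge_variants_spec : Claim_equal_merge_variants := by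
  intro m l s _
  simp only [Spec_merge_variants, merge_variants, merge_variants_alt]
  generalize hmd : PySem.Dict.ofList m = md
  generalize hld : PySem.Dict.ofList l = ld
  generalize hsd : PySem.Dict.ofList s = sd
  have hnm : md.keys.Nodup := hmd ▸ PySem.Dict.nodup_keys_ofList m
  have hnl : ld.keys.Nodup := hld ▸ PySem.Dict.nodup_keys_ofList l
  have hns : sd.keys.Nodup := hsd ▸ PySem.Dict.nodup_keys_ofList s
  set L1 := md.keys with hL1
  set L2 := ld.keys.filter (fun k => !(decide (k ∈ md.keys))) with hL2
  set L3 := sd.keys.filter (fun k => !(decide (k ∈ md.keys ++ ld.keys.filter (fun k => !(decide (k ∈ md.keys)))))) with hL3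
  -- A's union of key sets is the three segments in order
  have hKL : PySem.Set.union (PySem.Set.union (PySem.Set.ofList md.keys) (PySem.Set.ofList ld.keys)) (PySem.Set.ofList sd.keys) = L1 ++ L2 ++ L3 := by
    simp only [PySem.Set.union, PySem.Set.update_eq_append_filter, PySem.Set.ofList_ofList]
    rw [PySem.Set.ofList_eq_self_of_nodup md.keys hnm, PySem.Set.ofList_eq_self_of_nodup ld.keys hnl,
      PySem.Set.ofList_eq_self_of_nodup sd.keys hns]
    simp only [PySem.Set.contains_eq_decide, hL1, hL2, hL3]
  have hKnodup : (L1 ++ L2 ++ L3).Nodup := by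
    rw [← hKL]
    exact PySem.Set.nodup_union _ _ (PySem.Set.nodup_union _ _ (PySem.Set.nodup_ofList _))
  have hmem : ∀ k ∈ L1 ++ L2 ++ L3, (md.contains k || ld.contains k || sd.contains k) = true := by
    intro k hk
    rcases List.mem_append.1 hk with hk' | hk3
    · rcases List.mem_append.1 hk' with hk1 | hk2
      · simp [(PySem.Dict.contains_iff_mem_keys md k).mpr (hL1 ▸ hk1)]
      · simp [(PySem.Dict.contains_iff_mem_keys ld k).mpr (List.mem_filter.1 (hL2 ▸ hk2)).1]
    · simp [(PySem.Dict.contains_iff_mem_keys sd k).mpr (List.mem_filter.1 (hL3 ▸ hk3)).1]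
  rw [hKL, pvA_items md ld sd (L1 ++ L2 ++ L3) hKnodup hmem,
    pvB_decomp md ld sd hnm hnl hns
      (fun k => "MuTect" ++ if (ld.contains k && sd.contains k) = true then "+LoFreqSomatic+Strelka"
        else if sd.contains k = true then "+Strelka" else "")
      (fun k => if sd.contains k = true then "LoFreqSomatic+Strelka" else "LoFreqSomatic"),
    hL1, hL2, hL3, List.map_append, List.map_append]
  congr 1
  · congr 1
    · -- MuTect segment
      refine List.map_congr_left (fun k hk => ?_)
      have hm : md.contains k = true := (PySem.Dict.contains_iff_mem_keys md k).mpr hk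
      cases hl : ld.contains k <;> cases hs : sd.contains k <;>
        · simp only [pvFA, hm, hl, hs]
          rfl
    · -- LoFreqSomatic segment
      refine List.map_congr_left (fun k hk => ?_)
      have hk' := List.mem_filter.1 hk
      have hl : ld.contains k = true := (PySem.Dict.contains_iff_mem_keys ld k).mpr hk'.1
      have hm : md.contains k = false := by
        cases h : md.contains k
        · rfl
        · exact absurd (decide_eq_true ((PySem.Dict.contains_iff_mem_keys md k).mp h))
            (by simpa using hk'.2)
      cases hs : sd.contains k <;> simp [pvFA, hm, hl, hs]
  · -- Strelka segment
    refine List.map_congr_left (fun k hk => ?_)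
    have hk' := List.mem_filter.1 hk
    have hs : sd.contains k = true := (PySem.Dict.contains_iff_mem_keys sd k).mpr hk'.1
    have hnotin : ¬ k ∈ md.keys ++ ld.keys.filter (fun k => !(decide (k ∈ md.keys))) := by
      have h2 := hk'.2
      simp only [Bool.not_eq_true'] at h2
      exact of_decide_eq_false h2
    have hm : md.contains k = false := by
      cases h : md.contains k
      · rfl
      · exact absurd (List.mem_append.2 (Or.inl ((PySem.Dict.contains_iff_mem_keys md k).mp h))) hnotin
    have hl : ld.contains k = false := by
      cases h : ld.contains k
      · rfl
      · refine absurd (List.mem_append.2 (Or.inr ?_)) hnotin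
        refine List.mem_filter.2 ⟨(PySem.Dict.contains_iff_mem_keys ld k).mp h, ?_⟩
        simp only [Bool.not_eq_true']
        exact decide_eq_false (fun hmem' =>
          by simp [(PySem.Dict.contains_iff_mem_keys md k).mpr hmem'] at hm)
    simp [pvFA, hm, hl, hs]
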